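-- pv_equiv track=rewrite | github.com/0pill2-hue/openclaw-invest-workspace | scripts/stage3/external_primary_runtime.py | _rebalance_small_tail
-- ===== SOURCE A (Python) =====
-- MIN_BATCH_ITEMS = 20
--
-- def _rebalance_small_tail(batches: list[list[dict[str, object]]]) -> list[list[dict[str, object]]]:
--     if len(batches) < 2:
--         return batches
--     last = batches[-1]
--     prev = batches[-2]
--     while len(last) < MIN_BATCH_ITEMS and len(prev) > MIN_BATCH_ITEMS:
--         last.insert(0, prev.pop())
--     if len(last) == 0:
--         batches.pop()
--     return batches
-- ===== SOURCE B (Python) =====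
-- MIN_BATCH_ITEMS = 20
--
-- def _rebalance_small_tail(batches: list[list[dict[str, object]]]) -> list[list[dict[str, object]]]:
--     if len(batches) < 2:
--         return batches
--     last = batches[-1]
--     prev = batches[-2]
--     k = max(0, min(MIN_BATCH_ITEMS - len(last), len(prev) - MIN_BATCH_ITEMS))
--     if k:
--         moved = prev[len(prev) - k:]
--         del prev[len(prev) - k:]
--         last[:0] = moved
--     if len(last) == 0:
--         batches.pop()
--     return batches
-- ===== Notes on version B (the rewrite author's own statement) =====
-- stated objective: simpler
-- what changed: Replaces the one-element-at-a-time while loop (insert(0, prev.pop()) per item) with a single closed-form transfer count k = max(0, min(MIN_BATCH_ITEMS - len(last), len(prev) - MIN_BATCH_ITEMS)) and one bulk slice move, keeping the same in-place mutation of the list objects.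
import Mathlib
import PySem

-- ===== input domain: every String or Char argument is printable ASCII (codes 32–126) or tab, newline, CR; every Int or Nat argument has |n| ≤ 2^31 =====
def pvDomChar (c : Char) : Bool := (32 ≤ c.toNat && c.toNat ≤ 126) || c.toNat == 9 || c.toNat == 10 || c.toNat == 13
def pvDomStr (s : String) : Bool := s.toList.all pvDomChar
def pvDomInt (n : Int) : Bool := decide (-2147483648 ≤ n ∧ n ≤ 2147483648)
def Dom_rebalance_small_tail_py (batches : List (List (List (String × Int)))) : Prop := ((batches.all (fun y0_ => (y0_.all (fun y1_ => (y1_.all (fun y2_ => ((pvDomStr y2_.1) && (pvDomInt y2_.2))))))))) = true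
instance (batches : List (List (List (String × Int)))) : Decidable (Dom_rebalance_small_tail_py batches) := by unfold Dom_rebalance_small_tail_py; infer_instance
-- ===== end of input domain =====

-- B replaces A's one-element-at-a-time while loop by a single closed-form counted
-- slice transfer (objective: simpler). B performs the same in-place mutation of the
-- caller's lists as A; the theorem is about the return value.

-- ===== PORT A =====
-- the while loop: state (last, prev); one iteration does last.insert(0, prev.pop())
def pvLoopA (last prev : List (List (String × Int))) :
    List (List (String × Int)) × List (List (String × Int)) :=
  if h : last.length < 20 ∧ prev.length > 20 then
    pvLoopA (prev.getLast! :: last) prev.dropLast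
  else
    (prev, last)
termination_by prev.length
decreasing_by
  have hne : prev ≠ [] := by intro hnil; simp [hnil] at h
  have hlen : prev.dropLast.length = prev.length - 1 := by simp
  omega

def rebalance_small_tail_py (batches : List (List (List (String × Int)))) : List (List (List (String × Int))) :=
  if batches.length < 2 then batches
  else
    let last := batches.getLast!
    let prev := batches.dropLast.getLast!
    let (prev', last') := pvLoopA last prev
    let front := batches.dropLast.dropLast
    if last'.length = 0 then front ++ [prev'] else front ++ [prev', last']

-- ===== PORT B =====
def rebalance_small_tail_py_alt (batches : List (List (List (String × Int)))) : List (List (List (String × Int))) :=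
  if batches.length < 2 then batches
  else
    let last := batches.getLast!
    let prev := batches.dropLast.getLast!
    let k : Int := max 0 (min (20 - (last.length : Int)) ((prev.length : Int) - 20))
    let moved := prev.drop (prev.length - k.toNat)   -- prev[len(prev)-k:]
    let prev' := prev.take (prev.length - k.toNat)   -- del prev[len(prev)-k:]
    let last' := moved ++ last                       -- last[:0] = moved
    let front := batches.dropLast.dropLast
    if last'.length = 0 then front ++ [prev'] else front ++ [prev', last']

-- ===== PRECONDITION & SPEC =====
def Spec_rebalance_small_tail_py (batches : List (List (List (String × Int)))) (out : List (List (List (String × Int)))) : Prop := out = rebalance_small_tail_py_alt batches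
instance (batches : List (List (List (String × Int)))) (out : List (List (List (String × Int)))) : Decidable (Spec_rebalance_small_tail_py batches out) := by unfold Spec_rebalance_small_tail_py; infer_instance

-- ===== CLAIM (what is proved, stated in full; the proofs are below) =====
def Claim_equal_rebalance_small_tail_py : Prop := ∀ (batches : List (List (List (String × Int)))), Dom_rebalance_small_tail_py batches → Spec_rebalance_small_tail_py batches (rebalance_small_tail_py batches)

-- ===== LEMMAS AND PROOFS =====

-- the while loop computes the closed-form counted transfer
lemma pvLoopA_eq (prev last : List (List (String × Int))) :
    pvLoopA last prev =
      (prev.take (prev.length - min (20 - last.length) (prev.length - 20)),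
       prev.drop (prev.length - min (20 - last.length) (prev.length - 20)) ++ last) := by
  induction hn : prev.length using Nat.strong_induction_on generalizing prev last with
  | _ n ih =>
    subst hn
    rw [pvLoopA]
    split
    · rename_i h
      have hne : prev ≠ [] := by intro hnil; simp [hnil] at h
      rw [ih prev.dropLast.length (by simp [List.length_dropLast]; omega) prev.dropLast
            (prev.getLast! :: last) rfl]
      have hlen : prev.dropLast.length = prev.length - 1 := by simp
      have hk : prev.dropLast.length -
            min (20 - (prev.getLast! :: last).length) (prev.dropLast.length - 20)
          = prev.length - min (20 - last.length) (prev.length - 20) := by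
        simp only [List.length_cons]
        omega
      rw [hk]
      have hsplit : prev.dropLast ++ [prev.getLast!] = prev := by
        rw [List.getLast!_eq_getLast?_getD, List.getLast?_eq_some_getLast hne]
        exact List.dropLast_append_getLast hne
      have hmle : prev.length - min (20 - last.length) (prev.length - 20)
          ≤ prev.dropLast.length := by omega
      have ht : prev.take (prev.length - min (20 - last.length) (prev.length - 20))
          = prev.dropLast.take (prev.length - min (20 - last.length) (prev.length - 20)) :=
        calc prev.take (prev.length - min (20 - last.length) (prev.length - 20))
            = (prev.dropLast ++ [prev.getLast!]).take
                (prev.length - min (20 - last.length) (prev.length - 20)) := by rw [hsplit]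
          _ = prev.dropLast.take (prev.length - min (20 - last.length) (prev.length - 20)) :=
            List.take_append_of_le_length hmle
      have hd : prev.drop (prev.length - min (20 - last.length) (prev.length - 20))
          = prev.dropLast.drop (prev.length - min (20 - last.length) (prev.length - 20))
            ++ [prev.getLast!] :=
        calc prev.drop (prev.length - min (20 - last.length) (prev.length - 20))
            = (prev.dropLast ++ [prev.getLast!]).drop
                (prev.length - min (20 - last.length) (prev.length - 20)) := by rw [hsplit]
          _ = prev.dropLast.drop (prev.length - min (20 - last.length) (prev.length - 20))
                ++ [prev.getLast!] := List.drop_append_of_le_length hmle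
      rw [ht, hd]
      simp
    · rename_i h
      have hk : min (20 - last.length) (prev.length - 20) = 0 := by omega
      simp [hk]

-- ===== VERDICT (by name: the statement is the Claim_ definition above) =====
theorem rebalance_small_tail_py_spec : Claim_equal_rebalance_small_tail_py := by
  intro batches _
  unfold Spec_rebalance_small_tail_py rebalance_small_tail_py rebalance_small_tail_py_alt
  split
  · rfl
  · simp only
    rw [pvLoopA_eq]
    have hk : (max 0 (min (20 - ((batches.getLast! : List (List (String × Int))).length : Int))
        ((batches.dropLast.getLast!.length : Int) - 20))).toNat
        = min (20 - batches.getLast!.length) (batches.dropLast.getLast!.length - 20) := by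
      omega
    rw [hk]
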